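-- pv_equiv track=rewrite | github.com/jkohans/adventofcode2020 | day19/day19.py | sequence_matches_pattern
-- ===== SOURCE A (Python) =====
-- def sequence_matches_pattern(sequence):
--     # count 31s at the end and make sure there and at least n+1 42s at the beginning
--     num_trailing_31s = 0
--
--     for i in range(len(sequence) - 1, -1, -1):
--         if sequence[i] == 31:
--             num_trailing_31s += 1
--         else:
--             break
--
--     if len(sequence) < num_trailing_31s * 2 + 1:
--         # not enough numbers to make the pattern
--         return False
--
--     end_mid_idx = len(sequence) - num_trailing_31s
--     front_mid_idx = end_mid_idx - num_trailing_31s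
--     mid_slice = sequence[front_mid_idx:end_mid_idx]
--     front_slice = sequence[:front_mid_idx]
--
--     if set(mid_slice) == {42} and set(front_slice) == {42}:
--         return True
--     else:
--         return False
-- ===== SOURCE B (Python) =====
-- def sequence_matches_pattern(sequence):
--     # Run-length encode the sequence in one forward pass, then check the
--     # run structure: exactly [42-run, 31-run] with len(42-run) >= len(31-run) + 1.
--     runs = []
--     for x in sequence:
--         if runs and runs[-1][0] == x:
--             runs[-1][1] += 1
--         else:
--             runs.append([x, 1])
--     return (len(runs) == 2 and runs[0][0] == 42 and runs[1][0] == 31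
--             and runs[0][1] >= runs[1][1] + 1)
-- ===== Notes on version B (the rewrite author's own statement) =====
-- stated objective: alternative
-- what changed: Replaces A's backward trailing-31 counter plus slice/set-equality checks with a single forward run-length encoding pass followed by a structural check on the run list (exactly two runs, values 42 then 31, first run at least one longer).
import Mathlib
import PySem

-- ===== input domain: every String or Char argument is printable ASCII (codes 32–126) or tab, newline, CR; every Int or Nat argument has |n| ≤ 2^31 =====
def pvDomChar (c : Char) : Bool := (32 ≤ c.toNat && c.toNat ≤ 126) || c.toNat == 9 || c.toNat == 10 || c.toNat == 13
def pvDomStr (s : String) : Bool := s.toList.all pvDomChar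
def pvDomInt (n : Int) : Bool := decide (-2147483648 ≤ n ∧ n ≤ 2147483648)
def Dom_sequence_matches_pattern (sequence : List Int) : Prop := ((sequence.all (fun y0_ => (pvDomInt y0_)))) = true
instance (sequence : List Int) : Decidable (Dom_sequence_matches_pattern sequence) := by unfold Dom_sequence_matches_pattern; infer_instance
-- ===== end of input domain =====

-- B replaces A's backward trailing-31 counter and slice/set-equality checks with a single
-- forward run-length-encoding pass and a structural check on the run list (alternative decomposition).


-- ===== PORT A =====
-- the backward 'for i in range(len(sequence)-1, -1, -1): … else break' loop, as a
-- descending recursion on the index (argument n = i + 1; break returns the current count)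
def loopA31 (sequence : List Int) : Nat → Int
  | 0 => 0
  | n + 1 =>
    if PySem.List.pyGetD sequence (n : Int) 0 = 31 then loopA31 sequence n + 1 else 0

def sequence_matches_pattern (sequence : List Int) : Bool :=
  let num_trailing_31s : Int := loopA31 sequence sequence.length
  if (sequence.length : Int) < num_trailing_31s * 2 + 1 then false
  else
    let end_mid_idx : Int := (sequence.length : Int) - num_trailing_31s
    let front_mid_idx : Int := end_mid_idx - num_trailing_31s
    let mid_slice := PySem.List.slice sequence (some front_mid_idx) (some end_mid_idx)
    let front_slice := PySem.List.slice sequence none (some front_mid_idx)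
    if PySem.Set.equal (PySem.Set.ofList mid_slice) (PySem.Set.ofList [42]) &&
       PySem.Set.equal (PySem.Set.ofList front_slice) (PySem.Set.ofList [42]) then true
    else false

-- ===== PORT B =====
-- Source B's loop body: runs are kept most-recent-run first (head = runs[-1]);
-- 'runs[-1][1] += 1' is incrementing the head count, 'runs.append([x, 1])' is consing (x, 1)
def runStep (runs : List (Int × Int)) (x : Int) : List (Int × Int) :=
  match runs with
  | (v, c) :: rest => if v = x then (v, c + 1) :: rest else (x, 1) :: (v, c) :: rest
  | [] => [(x, 1)]

def sequence_matches_pattern_alt (sequence : List Int) : Bool :=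
  let rruns := sequence.foldl runStep []
  match rruns.reverse with
  | [(v1, c1), (v2, c2)] => v1 == 42 && v2 == 31 && decide (c2 + 1 ≤ c1)
  | _ => false

-- ===== PRECONDITION & SPEC =====
def Spec_sequence_matches_pattern (sequence : List Int) (out : Bool) : Prop := out = sequence_matches_pattern_alt sequence
instance (sequence : List Int) (out : Bool) : Decidable (Spec_sequence_matches_pattern sequence out) := by unfold Spec_sequence_matches_pattern; infer_instance

-- ===== CLAIM (what is proved, stated in full; the proofs are below) =====
def Claim_equal_sequence_matches_pattern : Prop := ∀ (sequence : List Int), Dom_sequence_matches_pattern sequence → Spec_sequence_matches_pattern sequence (sequence_matches_pattern sequence)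

-- ===== LEMMAS AND PROOFS =====

-- the number of trailing 31s, read off the reversed list
def trail31 : List Int → Nat
  | [] => 0
  | x :: t => if x = 31 then trail31 t + 1 else 0

-- the common shape both programs recognise
def goodP (seq : List Int) : Prop :=
  ∃ m k : Nat, 1 ≤ k ∧ k + 1 ≤ m ∧ seq = List.replicate m 42 ++ List.replicate k 31

theorem loopA31_append (ys : List Int) (y : Int) :
    ∀ n, n ≤ ys.length → loopA31 (ys ++ [y]) n = loopA31 ys n := by
  intro n
  induction n with
  | zero => intro _; rfl
  | succ n ih =>
    intro h
    have hn : n < ys.length := by omega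
    simp only [loopA31, PySem.List.pyGetD_natCast, List.getD,
      List.getElem?_append_left hn, ih (by omega)]

theorem loopA31_eq (seq : List Int) :
    loopA31 seq seq.length = (trail31 seq.reverse : Int) := by
  induction seq using List.reverseRecOn with
  | nil => rfl
  | append_singleton ys y ih =>
    have hget : PySem.List.pyGetD (ys ++ [y]) ((ys.length : Nat) : Int) 0 = y := by
      simp [PySem.List.pyGetD_natCast, List.getD]
    simp only [List.length_append, List.length_cons, List.length_nil, Nat.add_zero,
      loopA31, hget, List.reverse_append, List.reverse_cons, List.reverse_nil,
      List.nil_append, List.singleton_append, trail31]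
    rw [loopA31_append ys y ys.length le_rfl, ih]
    split <;> simp

theorem trail31_le (l : List Int) : trail31 l ≤ l.length := by
  induction l with
  | nil => simp [trail31]
  | cons x t ih => simp only [trail31]; split <;> simp <;> omega

theorem take_trail31 (l : List Int) : l.take (trail31 l) = List.replicate (trail31 l) 31 := by
  induction l with
  | nil => rfl
  | cons x t ih =>
    simp only [trail31]
    split
    · next h => simp [List.replicate_succ, h, ih]
    · rfl

theorem trail31_replicate_append (k : Nat) (l : List Int) :
    trail31 (List.replicate k 31 ++ l) = k + trail31 l := by
  induction k with
  | zero => simp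
  | succ k ih => simp [List.replicate_succ, trail31, ih]; omega

theorem trail31_cons_42 (l : List Int) : trail31 ((42 : Int) :: l) = 0 := by
  simp [trail31]

-- trail31 of the reverse of the good shape is exactly k
theorem trail31_reverse_pattern (m k : Nat) (hm : 1 ≤ m) :
    trail31 (List.replicate m 42 ++ List.replicate k (31 : Int)).reverse = k := by
  obtain ⟨m', rfl⟩ : ∃ m', m = m' + 1 := ⟨m - 1, by omega⟩
  rw [List.reverse_append, List.reverse_replicate, List.reverse_replicate,
    trail31_replicate_append, List.replicate_succ, trail31_cons_42]
  omega

-- set(l) == {42}  ⟺  l is nonempty and all 42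
theorem setEq42 (l : List Int) :
    PySem.Set.equal (PySem.Set.ofList l) (PySem.Set.ofList [42]) = true ↔
      (l ≠ [] ∧ ∀ x ∈ l, x = (42 : Int)) := by
  rw [PySem.Set.equal_iff]
  constructor
  · intro h
    have h42 : (42 : Int) ∈ l := by
      have := (h 42).2; simp [PySem.Set.mem_ofList] at this; exact this
    refine ⟨by rintro rfl; simp at h42, ?_⟩
    intro x hx
    have := (h x).1; simp [PySem.Set.mem_ofList] at this; exact this hx
  · rintro ⟨hne, hall⟩ x
    simp only [PySem.Set.mem_ofList, List.mem_singleton]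
    constructor
    · exact hall x
    · rintro rfl
      obtain ⟨y, hy⟩ := List.exists_mem_of_ne_nil l hne
      have := hall y hy; subst this; exact hy

-- the last trail31 elements of seq are 31s
theorem drop_trail31 (seq : List Int) :
    seq.drop (seq.length - trail31 seq.reverse) = List.replicate (trail31 seq.reverse) 31 := by
  have h := congrArg List.reverse (take_trail31 seq.reverse)
  rw [List.reverse_take] at h
  simpa using h

-- ==== A ⟺ goodP ====

theorem A_iff (seq : List Int) : sequence_matches_pattern seq = true ↔ goodP seq := by
  unfold sequence_matches_pattern
  rw [loopA31_eq]
  set t := trail31 seq.reverse with ht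
  set n := seq.length with hn
  have htle : t ≤ n := by
    have := trail31_le seq.reverse
    simpa [ht, hn] using this
  have hifb : ∀ (b : Bool), (if b = true then true else false) = b := fun b => by
    cases b <;> rfl
  by_cases hlt : (n : Int) < (t : Int) * 2 + 1
  · simp only [if_pos hlt]
    simp only [Bool.false_eq_true, false_iff]
    rintro ⟨m, k, hk, hm, rfl⟩
    have htk : t = k := by
      rw [ht, trail31_reverse_pattern m k (by omega)]
    have hlen : n = m + k := by simp [hn]
    omega
  · simp only [if_neg hlt]
    push_neg at hlt
    have h2t : 2 * t + 1 ≤ n := by omega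
    have hfm : ((n : Int) - t - t) = ((n - 2 * t : Nat) : Int) := by push_cast; omega
    have hem : ((n : Int) - t) = ((n - t : Nat) : Int) := by push_cast; omega
    rw [hfm, hem, PySem.List.slice_natCast, PySem.List.slice_to_natCast]
    have hmid : (seq.drop (n - 2 * t)).take (n - t - (n - 2 * t)) =
        (seq.take (n - t)).drop (n - 2 * t) := by
      rw [List.drop_take]
    rw [hmid]
    rw [hifb, Bool.and_eq_true]
    constructor
    · rintro ⟨hm, hf⟩
      rw [setEq42] at hm hf
      obtain ⟨hm1, hm2⟩ := hm
      obtain ⟨hf1, hf2⟩ := hf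
      -- first n - t elements are all 42
      have hall : ∀ x ∈ seq.take (n - t), x = (42 : Int) := by
        intro x hx
        have hsplit : seq.take (n - t) =
            seq.take (n - 2 * t) ++ (seq.take (n - t)).drop (n - 2 * t) := by
          have h' := (List.take_append_drop (n - 2 * t) (seq.take (n - t))).symm
          rwa [List.take_take, min_eq_left (by omega)] at h'
        rw [hsplit] at hx
        rcases List.mem_append.1 hx with h | h
        · exact hf2 x h
        · exact hm2 x h
      have hkpos : 1 ≤ t := by
        by_contra h0
        have ht0 : t = 0 := by omega
        apply hm1
        rw [ht0]
        simp only [Nat.mul_zero, Nat.sub_zero]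
        rw [List.drop_eq_nil_iff.2 (by simp [hn])]
      refine ⟨n - t, t, hkpos, by omega, ?_⟩
      have hfront : seq.take (n - t) = List.replicate (n - t) 42 := by
        rw [List.eq_replicate_iff]
        exact ⟨by rw [List.length_take]; omega, hall⟩
      calc seq = seq.take (n - t) ++ seq.drop (n - t) := (List.take_append_drop _ seq).symm
        _ = List.replicate (n - t) 42 ++ List.replicate t 31 := by
            rw [hfront, ht, drop_trail31]
    · rintro ⟨m, k, hk, hmk, hseq⟩
      have htk : t = k := by rw [ht, hseq, trail31_reverse_pattern m k (by omega)]
      have hlen : n = m + k := by rw [hn, hseq]; simp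
      have hmfront : seq.take (n - t) = List.replicate m 42 := by
        rw [hseq, htk, hlen, show m + k - k = m by omega, List.take_append_of_le_length (by simp),
          List.take_replicate, min_self]
      have hmid42 : (seq.take (n - t)).drop (n - 2 * t) = List.replicate k 42 := by
        rw [hmfront, htk, hlen, List.drop_replicate]
        congr 1
        omega
      constructor
      · rw [setEq42, hmid42]
        constructor
        · simp; omega
        · intro x hx; exact (List.eq_of_mem_replicate hx)
      · have hfront2 : seq.take (n - 2 * t) = List.replicate (m - k) 42 := by
          rw [hseq, htk, hlen, show m + k - 2 * k = m - k by omega,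
            List.take_append_of_le_length (by simp), List.take_replicate,
            min_eq_left (by omega)]
        rw [setEq42, hfront2]
        constructor
        · simp; omega
        · intro x hx; exact (List.eq_of_mem_replicate hx)

-- ==== B ⟺ goodP ====

def decodeR (rr : List (Int × Int)) : List Int :=
  rr.reverse.flatMap (fun p => List.replicate p.2.toNat p.1)

theorem decodeR_cons (p : Int × Int) (rr : List (Int × Int)) :
    decodeR (p :: rr) = decodeR rr ++ List.replicate p.2.toNat p.1 := by
  simp [decodeR]

theorem rruns_inv (seq : List Int) :
    decodeR (seq.foldl runStep []) = seq ∧ ∀ p ∈ seq.foldl runStep [], 1 ≤ p.2 := by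
  induction seq using List.reverseRecOn with
  | nil => exact ⟨rfl, by simp⟩
  | append_singleton ys y ih =>
    obtain ⟨hdec, hpos⟩ := ih
    rw [List.foldl_append]
    simp only [List.foldl_cons, List.foldl_nil]
    rcases hrr : ys.foldl runStep [] with _ | ⟨⟨v, c⟩, rest⟩
    · rw [hrr] at hdec
      constructor
      · simp [runStep, decodeR, ← hdec]
      · simp [runStep]
    · rw [hrr] at hdec hpos
      have hc : 1 ≤ c := hpos (v, c) (by simp)
      by_cases hv : v = y
      · simp only [runStep, if_pos hv]
        constructor
        · rw [decodeR_cons, ← hdec, decodeR_cons]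
          have hct : (c + 1).toNat = c.toNat + 1 := by omega
          rw [hct, List.replicate_succ', hv]
          simp
        · intro p hp
          rcases List.mem_cons.1 hp with rfl | hp
          · simp; omega
          · exact hpos p (by simp [hp])
      · simp only [runStep, if_neg hv]
        constructor
        · rw [decodeR_cons, hdec]
          simp
        · intro p hp
          rcases List.mem_cons.1 hp with rfl | hp
          · simp
          · exact hpos p hp

theorem foldl_runStep_replicate (j : Nat) :
    ∀ (v c : Int) (rest : List (Int × Int)),
      (List.replicate j v).foldl runStep ((v, c) :: rest) = (v, c + j) :: rest := by
  induction j with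
  | zero => intro v c rest; simp
  | succ j ih =>
    intro v c rest
    rw [List.replicate_succ, List.foldl_cons]
    have hstep : runStep ((v, c) :: rest) v = (v, c + 1) :: rest := by
      simp [runStep]
    rw [hstep, ih v (c + 1) rest]
    congr 2
    push_cast
    ring

theorem rruns_pattern (m k : Nat) (hm : 1 ≤ m) (hk : 1 ≤ k) :
    (List.replicate m (42 : Int) ++ List.replicate k 31).foldl runStep [] =
      [(31, (k : Int)), (42, (m : Int))] := by
  obtain ⟨m', rfl⟩ : ∃ m', m = m' + 1 := ⟨m - 1, by omega⟩
  obtain ⟨k', rfl⟩ : ∃ k', k = k' + 1 := ⟨k - 1, by omega⟩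
  rw [List.foldl_append, List.replicate_succ, List.foldl_cons]
  have h1 : runStep [] 42 = [((42 : Int), (1 : Int))] := rfl
  rw [h1, foldl_runStep_replicate m' 42 1 []]
  rw [List.replicate_succ, List.foldl_cons]
  have h2 : runStep [((42 : Int), 1 + (m' : Int))] 31 =
      [((31 : Int), (1 : Int)), (42, 1 + (m' : Int))] := by
    simp [runStep]
  rw [h2, foldl_runStep_replicate k' 31 1 _]
  have e1 : (1 : Int) + (k' : Int) = ((k' + 1 : Nat) : Int) := by push_cast; ring
  have e2 : (1 : Int) + (m' : Int) = ((m' + 1 : Nat) : Int) := by push_cast; ring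
  rw [e1, e2]

theorem B_iff (seq : List Int) : sequence_matches_pattern_alt seq = true ↔ goodP seq := by
  unfold sequence_matches_pattern_alt
  constructor
  · intro h
    simp only at h
    rcases hrr : (seq.foldl runStep []).reverse with _ | ⟨⟨v1, c1⟩, rest⟩
    · rw [hrr] at h; cases h
    rcases rest with _ | ⟨⟨v2, c2⟩, rest2⟩
    · rw [hrr] at h; cases h
    rcases rest2 with _ | _
    · rw [hrr] at h
      simp only [Bool.and_eq_true, beq_iff_eq, decide_eq_true_eq] at h
      obtain ⟨⟨hv1, hv2⟩, hc⟩ := h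
      obtain ⟨hdec, hpos⟩ := rruns_inv seq
      have hrr' : seq.foldl runStep [] = [(v2, c2), (v1, c1)] := by
        have := congrArg List.reverse hrr
        simpa using this
      rw [hrr'] at hdec hpos
      have hc1 : 1 ≤ c1 := hpos (v1, c1) (by simp)
      have hc2 : 1 ≤ c2 := hpos (v2, c2) (by simp)
      refine ⟨c1.toNat, c2.toNat, by omega, by omega, ?_⟩
      rw [← hdec, decodeR_cons, decodeR_cons, decodeR]
      subst hv1 hv2
      simp
    · rw [hrr] at h; cases h
  · rintro ⟨m, k, hk, hmk, rfl⟩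
    rw [rruns_pattern m k (by omega) hk]
    simp only [List.reverse_cons, List.reverse_nil, List.nil_append, List.singleton_append]
    simp only [Bool.and_eq_true, beq_iff_eq, decide_eq_true_eq, beq_self_eq_true,
      Bool.true_and, true_and, and_true]
    push_cast
    omega

-- ===== VERDICT (by name: the statement is the Claim_ definition above) =====
theorem sequence_matches_pattern_spec : Claim_equal_sequence_matches_pattern := by
  intro seq _
  unfold Spec_sequence_matches_pattern
  rcases hb : sequence_matches_pattern_alt seq with _ | _
  · rcases ha : sequence_matches_pattern seq with _ | _
    · rfl
    · exact absurd ((B_iff seq).2 ((A_iff seq).1 ha)) (by simp [hb])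
  · exact (A_iff seq).2 ((B_iff seq).1 hb)
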